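-- pv_equiv track=rewrite | github.com/rodriguez/Switch-Scraper | reddit_game_scraper.py | parser_for_valid_deal
-- ===== SOURCE A (Python) =====
-- def parser_for_valid_deal(title, in_db, game):
-- 	if in_db == True:
-- 		return False # we already saw this; if we didn't act on it before, we're not going to now
-- 	if game in title:
-- 		money_indices = []
-- 		iter_title = title
-- 		money_index = iter_title.find("$")
-- 		while money_index != -1:
-- 			ints = money_index+1
-- 			string = ""
-- 			while ints < len(iter_title) and iter_title[ints].isdigit() == True:
-- 				string += iter_title[ints]
-- 				ints += 1
-- 			money_indices.append(int(string))
-- 			money_index = iter_title.find("$", ints)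
-- 		if len(money_indices) != 0:
-- 			price = max(money_indices)
-- 			if price < 60 and price > 15:
-- 				return True # new deal with target price (probably a Switch deal)
-- 	return False # new deal but probably not a Switch deal (price not high enough)
-- ===== SOURCE B (Python) =====
-- def parser_for_valid_deal(title, in_db, game):
--     if in_db == True:
--         return False
--     if game not in title:
--         return False
--     prices = []
--     for part in title.split("$")[1:]:
--         digits = ""
--         for ch in part:
--             if not ch.isdigit():
--                 break
--             digits += ch
--         prices.append(int(digits))
--     return bool(prices) and 15 < max(prices) < 60
-- ===== Notes on version B (the rewrite author's own statement) =====
-- stated objective: alternative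
-- what changed: Replaced A's find('$')/manual index scanning loop with split('$') and a per-part leading-digit-run extraction; same guards and max-based price test.
import Mathlib
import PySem

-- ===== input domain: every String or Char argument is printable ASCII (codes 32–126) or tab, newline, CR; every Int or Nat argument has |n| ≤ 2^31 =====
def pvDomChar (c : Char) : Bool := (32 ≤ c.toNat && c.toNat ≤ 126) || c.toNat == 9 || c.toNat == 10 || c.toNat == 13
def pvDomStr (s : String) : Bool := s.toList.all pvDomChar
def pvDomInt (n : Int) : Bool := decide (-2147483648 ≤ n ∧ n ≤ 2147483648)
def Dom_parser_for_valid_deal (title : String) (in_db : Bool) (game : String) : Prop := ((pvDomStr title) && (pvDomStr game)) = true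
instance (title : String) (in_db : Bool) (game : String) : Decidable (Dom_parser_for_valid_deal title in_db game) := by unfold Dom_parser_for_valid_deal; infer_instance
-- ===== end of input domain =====

-- B replaces A's find('$') loop with manual index scanning by split('$') plus a
-- per-part leading-digit-run extraction (objective: alternative decomposition).

-- ===== PORT A =====

-- inner 'while ints < len(iter_title) and iter_title[ints].isdigit()' loop:
-- returns the collected digit string and the final value of ints
def pvInnerA (t : List Char) (i : Nat) : List Char × Nat :=
  if h : i < t.length then
    if PySem.Chars.isdigit (t[i]'h) then
      let r := pvInnerA t (i + 1)
      (t[i]'h :: r.1, r.2)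
    else ([], i)
  else ([], i)
termination_by t.length - i
decreasing_by omega

-- outer 'while money_index != -1' loop; fuel bounds the iterations (each step moves
-- money_index strictly right, so t.length + 1 suffices).
-- int(string) is ported as (ofChars? …).getD 0: exact whenever the digit string is
-- nonempty; Python raises ValueError on the empty string, excluded by Pre_.
def pvOuterA (t : List Char) (fuel : Nat) (mi : Int) (acc : List Int) : List Int :=
  match fuel with
  | 0 => acc
  | fuel + 1 =>
    if mi = -1 then acc
    else
      pvOuterA t fuel
        (PySem.Chars.findFrom t ['$'] (((pvInnerA t (mi + 1).toNat).2 : Nat) : Int) none)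
        (acc ++ [(PySem.Int.ofChars? (pvInnerA t (mi + 1).toNat).1).getD 0])

def parser_for_valid_deal (title : String) (in_db : Bool) (game : String) : Bool :=
  if in_db then false
  else if PySem.Str.isIn game title then
    let t := title.toList
    let ms := pvOuterA t (t.length + 1) (PySem.Chars.find t ['$']) []
    if ms.length ≠ 0 then
      match PySem.List.max? ms id with
      | some price => decide (price < 60 ∧ price > 15)
      | none => false
    else false
  else false

-- ===== PORT B =====

def parser_for_valid_deal_alt (title : String) (in_db : Bool) (game : String) : Bool :=
  if in_db then false
  else if !(PySem.Str.isIn game title) then false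
  else
    let parts := PySem.Chars.splitOn title.toList ['$']
    -- for each part after the first '$': the leading run of digit chars, as an int
    let prices := parts.tail.map
      (fun p => (PySem.Int.ofChars? (p.takeWhile PySem.Chars.isdigit)).getD 0)
    !prices.isEmpty &&
      (match PySem.List.max? prices id with
       | some m => decide (15 < m ∧ m < 60)
       | none => false)

-- ===== PRECONDITION & SPEC =====
-- Pre_ excludes exactly the inputs where Python A raises ValueError (int('')):
-- in_db false, game in title, and some '$' in title not immediately followed by a digit.
def Pre_parser_for_valid_deal (title : String) (in_db : Bool) (game : String) : Prop :=
  in_db = true ∨ PySem.Str.isIn game title = false ∨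
    ∀ i < title.toList.length, title.toList[i]? = some '$' →
      (title.toList[i + 1]?.any PySem.Chars.isdigit) = true
instance (title : String) (in_db : Bool) (game : String) : Decidable (Pre_parser_for_valid_deal title in_db game) := by unfold Pre_parser_for_valid_deal; infer_instance

def pvWitness_parser_for_valid_deal : String × Bool × String := ("Zelda BOTW only $25 (was $60)", false, "Zelda")

def Spec_parser_for_valid_deal (title : String) (in_db : Bool) (game : String) (out : Bool) : Prop := out = parser_for_valid_deal_alt title in_db game
instance (title : String) (in_db : Bool) (game : String) (out : Bool) : Decidable (Spec_parser_for_valid_deal title in_db game out) := by unfold Spec_parser_for_valid_deal; infer_instance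

-- ===== CLAIM (what is proved, stated in full; the proofs are below) =====
def Claim_equal_parser_for_valid_deal : Prop := ∀ (title : String) (in_db : Bool) (game : String), Dom_parser_for_valid_deal title in_db game → Pre_parser_for_valid_deal title in_db game → Spec_parser_for_valid_deal title in_db game (parser_for_valid_deal title in_db game)

-- ===== LEMMAS AND PROOFS =====

-- the common reference: prices read left to right ('$', then its digit run, skip, repeat)
def pvG (cs : List Char) : List Int :=
  match cs with
  | [] => []
  | c :: rest =>
    if c = '$' then
      (PySem.Int.ofChars? (rest.takeWhile PySem.Chars.isdigit)).getD 0 ::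
        pvG (rest.drop (rest.takeWhile PySem.Chars.isdigit).length)
    else pvG rest
termination_by cs.length
decreasing_by all_goals simp

-- structural model of title.split('$')
def pvS (cs : List Char) : List (List Char) :=
  match cs with
  | [] => [[]]
  | c :: rest => if c = '$' then [] :: pvS rest else (pvS rest).modifyHead (c :: ·)

theorem pvS_ne_nil (cs : List Char) : pvS cs ≠ [] := by
  induction cs with
  | nil => simp [pvS]
  | cons c rest ih =>
    simp only [pvS]
    split
    · simp
    · cases hS : pvS rest with
      | nil => exact absurd hS ih
      | cons p tl => simp [List.modifyHead]

theorem pvS_head? (cs : List Char) :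
    (pvS cs).head? = some (cs.takeWhile (fun c => !(c == '$'))) := by
  induction cs with
  | nil => simp [pvS]
  | cons c rest ih =>
    simp only [pvS, List.takeWhile_cons]
    by_cases h : c = '$'
    · simp [h]
    · simp only [h, if_false]
      cases hS : pvS rest with
      | nil => exact absurd hS (pvS_ne_nil rest)
      | cons p tl =>
        rw [hS] at ih
        simp only [List.head?_cons, Option.some.injEq] at ih
        simp [List.modifyHead, ih, h]

theorem pvGo_spec (fuel : Nat) : ∀ (l cur : List Char) (acc : List (List Char)),
    l.length < fuel →
    PySem.Chars.splitOn.go ['$'] fuel l cur acc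
      = acc.reverse ++ (pvS l).modifyHead (cur.reverse ++ ·) := by
  induction fuel with
  | zero => intro l cur acc h; omega
  | succ fuel ih =>
    intro l cur acc h
    cases l with
    | nil =>
      rw [PySem.Chars.splitOn.go]
      · simp [pvS, List.modifyHead]
      · omega
    | cons c rest =>
      by_cases hc : c = '$'
      · subst hc
        rw [PySem.Chars.splitOn.go]
        simp only [List.isPrefixOf, BEq.rfl, Bool.true_and, if_true]
        rw [show List.drop ['$'].length ('$' :: rest) = rest from rfl]
        rw [ih rest [] (cur.reverse :: acc) (by simpa using Nat.lt_of_succ_lt_succ h)]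
        cases hS : pvS rest with
        | nil => exact absurd hS (pvS_ne_nil rest)
        | cons p tl => simp [pvS, hS, List.modifyHead]
      · rw [PySem.Chars.splitOn.go]
        simp only [List.isPrefixOf, Bool.and_true]
        rw [if_neg (by simp [Ne.symm hc])]
        rw [ih rest (c :: cur) acc (by simpa using Nat.lt_of_succ_lt_succ h)]
        cases hS : pvS rest with
        | nil => exact absurd hS (pvS_ne_nil rest)
        | cons p tl => simp [pvS, hc, hS, List.modifyHead]

theorem pvSplitOn_eq_pvS (l : List Char) :
    PySem.Chars.splitOn l ['$'] = pvS l := by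
  rw [PySem.Chars.splitOn, pvGo_spec (l.length + 1) l [] [] (by omega)]
  cases hS : pvS l with
  | nil => exact absurd hS (pvS_ne_nil l)
  | cons p tl => simp [List.modifyHead]

theorem pvG_skip (c : Char) (rest : List Char) (h : ¬ c = '$') :
    pvG (c :: rest) = pvG rest := by
  rw [pvG]; simp [h]

theorem pvG_drop (l : List Char) (d : Nat)
    (h : ∀ c ∈ l.take d, c ≠ '$') : pvG l = pvG (l.drop d) := by
  induction l generalizing d with
  | nil => simp
  | cons c rest ih =>
    cases d with
    | zero => simp
    | succ d =>
      have hc : c ≠ '$' := h c (by simp)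
      rw [pvG_skip c rest hc, List.drop_succ_cons]
      exact ih d (fun x hx => h x (by simp [List.take_succ_cons]; right; exact hx))

theorem pvG_nil_of_not_mem (l : List Char) (h : '$' ∉ l) : pvG l = [] := by
  induction l with
  | nil => rw [pvG]
  | cons c rest ih =>
    have hc : c ≠ '$' := fun e => h (e ▸ List.mem_cons_self ..)
    rw [pvG_skip c rest hc]
    exact ih (fun m => h (List.mem_cons_of_mem _ m))

theorem pvTakeWhile_digits_part (l : List Char) :
    (l.takeWhile (fun c => !(c == '$'))).takeWhile PySem.Chars.isdigit
      = l.takeWhile PySem.Chars.isdigit := by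
  rw [List.takeWhile_takeWhile]
  congr 1
  funext a
  by_cases h : PySem.Chars.isdigit a = true
  · have hne : a ≠ '$' := fun e => absurd (e ▸ h) (by decide)
    simp [h, hne]
  · simp [h]

theorem pvTake_digits_ne_dollar (l : List Char) (c : Char)
    (h : c ∈ l.take (l.takeWhile PySem.Chars.isdigit).length) : c ≠ '$' := by
  have htake : l.take (l.takeWhile PySem.Chars.isdigit).length
      = l.takeWhile PySem.Chars.isdigit :=
    (List.prefix_iff_eq_take.mp (List.takeWhile_prefix _)).symm
  rw [htake] at h
  have hd := List.mem_takeWhile_imp h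
  intro e
  rw [e] at hd
  exact absurd hd (by decide)

theorem pvMap_tail_pvS (l : List Char) :
    (pvS l).tail.map
        (fun p => (PySem.Int.ofChars? (p.takeWhile PySem.Chars.isdigit)).getD 0)
      = pvG l := by
  induction l with
  | nil => simp [pvS, pvG]
  | cons c rest ih =>
    by_cases hc : c = '$'
    · subst hc
      rw [pvG]
      rw [if_pos rfl]
      cases hS : pvS rest with
      | nil => exact absurd hS (pvS_ne_nil rest)
      | cons p tl =>
        have hhead : p = rest.takeWhile (fun c => !(c == '$')) := by
          have h2 := pvS_head? rest
          rw [hS] at h2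
          simpa using h2
        rw [hS] at ih
        simp only [List.tail_cons] at ih
        have e1 : pvS ('$' :: rest) = [] :: pvS rest := by simp [pvS]
        rw [e1, hS, List.tail_cons, List.map_cons, ih, hhead]
        congr 1
        · rw [pvTakeWhile_digits_part]
        · exact pvG_drop rest _ (fun x hx => pvTake_digits_ne_dollar rest x hx)
    · rw [pvG_skip c rest hc]
      simp only [pvS, if_neg hc, List.tail_modifyHead]
      exact ih

theorem pvInnerA_spec (t : List Char) (i : Nat) :
    pvInnerA t i = ((t.drop i).takeWhile PySem.Chars.isdigit,
                    i + ((t.drop i).takeWhile PySem.Chars.isdigit).length) := by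
  rw [pvInnerA]
  split
  · next h =>
    have hd : t.drop i = t[i] :: t.drop (i + 1) := List.drop_eq_getElem_cons h
    split
    · next hdig =>
      rw [pvInnerA_spec t (i + 1), hd, List.takeWhile_cons]
      simp only [hdig, if_true, Prod.mk.injEq, List.length_cons]
      exact ⟨by trivial, by omega⟩
    · next hdig =>
      rw [hd, List.takeWhile_cons]
      simp only [hdig, if_false, Bool.false_eq_true, List.length_nil]
      simp
  · next h =>
    have : t.drop i = [] := List.drop_eq_nil_of_le (by omega)
    simp [this]
termination_by t.length - i
decreasing_by omega

theorem pvDollar_mem_infix (l : List Char) (h : '$' ∈ l) : ['$'] <:+: l := by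
  obtain ⟨s, t, rfl⟩ := List.append_of_mem h
  exact ⟨s, t, by simp⟩

theorem pvOuterA_spec (t : List Char) (fuel : Nat) (i : Nat) (acc : List Int)
    (hi : i ≤ t.length) (hf : t.length - i < fuel) :
    pvOuterA t fuel (PySem.Chars.findFrom t ['$'] (i : Int) none) acc
      = acc ++ pvG (t.drop i) := by
  induction fuel generalizing i acc with
  | zero => omega
  | succ fuel ih =>
    rw [PySem.Chars.findFrom_natCast t ['$'] i hi]
    by_cases h1 : PySem.Chars.find (t.drop i) ['$'] = -1
    · rw [if_pos h1, pvOuterA, if_pos rfl]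
      have hnm : '$' ∉ t.drop i := fun m =>
        ((PySem.Chars.find_eq_neg_one_iff (t.drop i) ['$']).mp h1) (pvDollar_mem_infix _ m)
      rw [pvG_nil_of_not_mem _ hnm, List.append_nil]
    · rw [if_neg h1]
      set k : Int := PySem.Chars.find (t.drop i) ['$'] with hk
      have hk0 : 0 ≤ k := by
        have h2 := PySem.Chars.neg_one_le_find (t.drop i) ['$']
        rw [← hk] at h2
        omega
      obtain ⟨hpre, hmin⟩ := PySem.Chars.find_spec (s := t.drop i) (sub := ['$']) (by omega)
      rw [← hk] at hpre hmin
      set m := i + k.toNat with hmdef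
      -- the found '$' sits at absolute position m
      have hm : t.drop m = '$' :: t.drop (m + 1) := by
        obtain ⟨u, hu⟩ := hpre
        rw [List.drop_drop] at hu
        have hu' : u = List.drop (m + 1) t := by
          have h3 := congrArg List.tail hu
          rw [List.tail_drop] at h3
          simpa using h3
        rw [← hu, hu']
        rfl
      have hmlt : m < t.length := by
        by_contra hge
        rw [List.drop_eq_nil_of_le (by omega)] at hm
        simp at hm
      -- characters strictly before position m (from i on) are not '$'
      have hskip : pvG (t.drop i) = pvG (t.drop m) := by
        rw [pvG_drop (t.drop i) k.toNat ?mem, List.drop_drop, ← hmdef]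
        case mem =>
          intro c hc e
          obtain ⟨j, hj, hcj⟩ := List.getElem_of_mem hc
          rw [List.length_take] at hj
          have hjlt : j < k.toNat := by omega
          apply hmin j hjlt
          have hjlt2 : j < (t.drop i).length := by omega
          rw [List.drop_eq_getElem_cons hjlt2]
          rw [List.getElem_take] at hcj
          rw [hcj, e]
          exact ⟨_, rfl⟩
      -- one step of the loop
      rw [pvOuterA, if_neg (by omega)]
      have htn : ((i : Int) + k + 1).toNat = m + 1 := by omega
      rw [htn]
      simp only [pvInnerA_spec]
      set d := ((t.drop (m + 1)).takeWhile PySem.Chars.isdigit).length with hd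
      have hdle : d ≤ t.length - (m + 1) := by
        have h6 := (List.takeWhile_prefix (l := t.drop (m + 1))
          (PySem.Chars.isdigit)).length_le
        rw [List.length_drop] at h6
        omega
      rw [ih (m + 1 + d) _ (by omega) (by omega)]
      rw [hskip, hm, pvG, if_pos rfl, ← hd]
      simp

theorem pv_main (title : String) (in_db : Bool) (game : String) :
    parser_for_valid_deal title in_db game = parser_for_valid_deal_alt title in_db game := by
  unfold parser_for_valid_deal parser_for_valid_deal_alt
  cases in_db with
  | true => rfl
  | false =>
    cases hIn : PySem.Str.isIn game title with
    | false => simp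
    | true =>
      have hms : pvOuterA title.toList (title.toList.length + 1)
          (PySem.Chars.find title.toList ['$']) [] = pvG title.toList := by
        have h0 := pvOuterA_spec title.toList (title.toList.length + 1) 0 []
          (by omega) (by omega)
        simpa using h0
      simp only [if_true, Bool.not_true, Bool.false_eq_true, if_false, hms]
      rw [pvSplitOn_eq_pvS, pvMap_tail_pvS]
      cases hG : pvG title.toList with
      | nil => simp
      | cons a l =>
        rw [if_pos (by simp)]
        simp only [List.isEmpty_cons, Bool.not_false, Bool.true_and]
        cases hmax : PySem.List.max? (a :: l) id with
        | none => simp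
        | some p =>
          simp only []
          exact decide_eq_decide.mpr (by constructor <;> (intro h; exact ⟨h.2, h.1⟩))

-- ===== VERDICT (by name: the statement is the Claim_ definition above) =====
theorem parser_for_valid_deal_spec : Claim_equal_parser_for_valid_deal := by
  intro title in_db game _ _
  unfold Spec_parser_for_valid_deal
  exact pv_main title in_db game
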